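-- pv_equiv track=rewrite | github.com/SolomonB14D3/noethersolve | noethersolve/catalysis_hub_api.py | _resolve_cache_key
-- ===== SOURCE A (Python) =====
-- from typing import Dict, List, Optional
--
-- NORSKOV_2005_H_ADSORPTION: Dict[str, float] = {
--     "Pt(111)":   -0.09,
--     "Pd(111)":   -0.45,
--     "Ni(111)":   -0.56,
--     "Cu(111)":    0.04,
--     "Au(111)":    0.38,
--     "Ru(0001)":  -0.42,
--     "Ir(111)":   -0.26,
--     "Rh(111)":   -0.33,
-- }
--
-- _SURFACE_ALIASES: Dict[str, str] = {
--     "Pt":   "Pt(111)",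
--     "Pd":   "Pd(111)",
--     "Ni":   "Ni(111)",
--     "Cu":   "Cu(111)",
--     "Au":   "Au(111)",
--     "Ru":   "Ru(0001)",
--     "Ir":   "Ir(111)",
--     "Rh":   "Rh(111)",
-- }
--
-- def _resolve_cache_key(surface: str) -> Optional[str]:
--     """Find the matching key in the Norskov cache."""
--     s = surface.strip()
--     if s in NORSKOV_2005_H_ADSORPTION:
--         return s
--     if s in _SURFACE_ALIASES:
--         return _SURFACE_ALIASES[s]
--     # Try case-insensitive match
--     s_lower = s.lower()
--     for key in NORSKOV_2005_H_ADSORPTION: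
--         if key.lower() == s_lower or key.lower().startswith(s_lower + "("):
--             return key
--     for alias, full in _SURFACE_ALIASES.items():
--         if alias.lower() == s_lower:
--             return full
--     return None
-- ===== SOURCE B (Python) =====
-- NORSKOV_2005_H_ADSORPTION = {
--     "Pt(111)":   -0.09,
--     "Pd(111)":   -0.45,
--     "Ni(111)":   -0.56,
--     "Cu(111)":    0.04,
--     "Au(111)":    0.38,
--     "Ru(0001)":  -0.42,
--     "Ir(111)":   -0.26,
--     "Rh(111)":   -0.33,
-- }
--
-- _SURFACE_ALIASES = {
--     "Pt":   "Pt(111)",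
--     "Pd":   "Pd(111)",
--     "Ni":   "Ni(111)",
--     "Cu":   "Cu(111)",
--     "Au":   "Au(111)",
--     "Ru":   "Ru(0001)",
--     "Ir":   "Ir(111)",
--     "Rh":   "Rh(111)",
-- }
--
-- # One normalized lookup table, built once: lowercase canonical key and
-- # lowercase alias (= the element-symbol prefix of the key) both map to
-- # the canonical key.
-- _TABLE = {}
-- for _key in NORSKOV_2005_H_ADSORPTION:
--     _TABLE[_key.lower()] = _key
-- for _alias, _full in _SURFACE_ALIASES.items():
--     _TABLE[_alias.lower()] = _full
--
-- def _resolve_cache_key(surface):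
--     """Find the matching key in the Norskov cache."""
--     return _TABLE.get(surface.strip().lower())
-- ===== Notes on version B (the rewrite author's own statement) =====
-- stated objective: simpler
-- what changed: A's four sequential matching stages (exact key membership, exact alias membership, a case-insensitive scan over keys with a startswith prefix test, and a case-insensitive scan over aliases) are replaced by one normalized lookup table built once (lowercased key and lowercased alias both map to the canonical key), so the function body is a single dict lookup on surface.strip().lower().
import Mathlib
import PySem

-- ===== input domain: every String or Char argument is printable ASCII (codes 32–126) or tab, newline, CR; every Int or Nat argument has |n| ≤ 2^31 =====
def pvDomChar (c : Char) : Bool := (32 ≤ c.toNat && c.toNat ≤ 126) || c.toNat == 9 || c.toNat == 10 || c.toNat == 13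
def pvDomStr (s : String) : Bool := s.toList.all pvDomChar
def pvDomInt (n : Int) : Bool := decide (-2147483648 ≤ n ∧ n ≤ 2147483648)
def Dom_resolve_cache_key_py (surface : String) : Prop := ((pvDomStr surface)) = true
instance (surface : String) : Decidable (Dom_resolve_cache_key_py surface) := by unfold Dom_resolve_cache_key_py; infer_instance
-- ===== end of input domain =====

-- B replaces A's four sequential matching stages by one precomputed normalized
-- lookup table consulted once (objective: simpler).

-- ===== PORT A =====
-- NORSKOV_2005_H_ADSORPTION: only its KEYS are used by the function (membership
-- and iteration), so it is ported as its key list; the float values are unused.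
def norskovKeysA : List String :=
  ["Pt(111)", "Pd(111)", "Ni(111)", "Cu(111)", "Au(111)", "Ru(0001)", "Ir(111)", "Rh(111)"]

def surfaceAliasesA : PySem.Dict String String :=
  PySem.Dict.mk [("Pt", "Pt(111)"), ("Pd", "Pd(111)"), ("Ni", "Ni(111)"), ("Cu", "Cu(111)"),
                 ("Au", "Au(111)"), ("Ru", "Ru(0001)"), ("Ir", "Ir(111)"), ("Rh", "Rh(111)")]

-- `for key in NORSKOV_2005_H_ADSORPTION: if key.lower() == s_lower or key.lower().startswith(s_lower + "("): return key`
def keyLoopA : List String → String → Option String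
  | [], _ => none
  | key :: rest, sLower =>
      if PySem.Str.lower key == sLower
         || PySem.Str.startswith (PySem.Str.lower key) (sLower ++ "(") then some key
      else keyLoopA rest sLower

-- `for alias, full in _SURFACE_ALIASES.items(): if alias.lower() == s_lower: return full`
def aliasLoopA : List (String × String) → String → Option String
  | [], _ => none
  | (alias_, full) :: rest, sLower =>
      if PySem.Str.lower alias_ == sLower then some full
      else aliasLoopA rest sLower

def resolve_cache_key_py (surface : String) : Option String :=
  let s := PySem.Str.strip surface
  if norskovKeysA.contains s then some s
  else if surfaceAliasesA.contains s then surfaceAliasesA.get? s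
  else
    let sLower := PySem.Str.lower s
    match keyLoopA norskovKeysA sLower with
    | some key => some key
    | none => aliasLoopA surfaceAliasesA.items sLower

-- ===== PORT B =====
def norskovKeysB : List String :=
  ["Pt(111)", "Pd(111)", "Ni(111)", "Cu(111)", "Au(111)", "Ru(0001)", "Ir(111)", "Rh(111)"]

def surfaceAliasesB : List (String × String) :=
  [("Pt", "Pt(111)"), ("Pd", "Pd(111)"), ("Ni", "Ni(111)"), ("Cu", "Cu(111)"),
   ("Au", "Au(111)"), ("Ru", "Ru(0001)"), ("Ir", "Ir(111)"), ("Rh", "Rh(111)")]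

-- the module-level `_TABLE`, built once from both dicts
def tableB : PySem.Dict String String :=
  let d := norskovKeysB.foldl (fun d key => d.insert (PySem.Str.lower key) key) PySem.Dict.empty
  surfaceAliasesB.foldl (fun d kv => d.insert (PySem.Str.lower kv.1) kv.2) d

def resolve_cache_key_py_alt (surface : String) : Option String :=
  tableB.get? (PySem.Str.lower (PySem.Str.strip surface))

-- ===== PRECONDITION & SPEC =====
def Spec_resolve_cache_key_py (surface : String) (out : Option String) : Prop := out = resolve_cache_key_py_alt surface
instance (surface : String) (out : Option String) : Decidable (Spec_resolve_cache_key_py surface out) := by unfold Spec_resolve_cache_key_py; infer_instance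

-- ===== CLAIM (what is proved, stated in full; the proofs are below) =====
def Claim_equal_resolve_cache_key_py : Prop := ∀ (surface : String), Dom_resolve_cache_key_py surface → Spec_resolve_cache_key_py surface (resolve_cache_key_py surface)

-- ===== LEMMAS AND PROOFS =====

set_option maxRecDepth 4096

-- `xs ++ ['(']` is a prefix of `pre ++ '(' :: rest` (with no other '(' around) iff xs = pre
lemma prefix_paren (pre rest xs : List Char) (h1 : '(' ∉ pre) (h2 : '(' ∉ rest) :
    (xs ++ ['(']) <+: (pre ++ '(' :: rest) ↔ xs = pre := by
  induction pre generalizing xs with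
  | nil =>
      cases xs with
      | nil => simp
      | cons c ys =>
          simp only [List.nil_append, List.cons_append, List.cons_prefix_cons]
          constructor
          · rintro ⟨rfl, hp⟩
            exfalso; exact h2 (hp.subset (by simp))
          · intro h; cases h
  | cons p pre' ih =>
      have h1' : '(' ∉ pre' := fun h => h1 (List.mem_cons_of_mem _ h)
      have hp : '(' ≠ p := fun h => h1 (h ▸ List.mem_cons_self ..)
      cases xs with
      | nil =>
          simp only [List.nil_append, List.cons_append, List.cons_prefix_cons]
          constructor
          · rintro ⟨h, -⟩; exact absurd h hp
          · intro h; cases h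
      | cons c ys =>
          simp only [List.cons_append, List.cons_prefix_cons, ih ys h1', List.cons.injEq]

lemma startswith_paren (pre rest : List Char) (u : String) (h1 : '(' ∉ pre) (h2 : '(' ∉ rest) :
    PySem.Str.startswith (String.ofList (pre ++ '(' :: rest)) (u ++ "(") = (u == String.ofList pre) := by
  have hiff : PySem.Str.startswith (String.ofList (pre ++ '(' :: rest)) (u ++ "(") = true ↔ u = String.ofList pre := by
    rw [PySem.Str.startswith_eq,
        show (u ++ "(").toList = u.toList ++ ['('] from by simp,
        show (String.ofList (pre ++ '(' :: rest)).toList = pre ++ '(' :: rest from by simp,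
        PySem.Chars.startswith_iff, prefix_paren pre rest u.toList h1 h2]
    constructor
    · intro h; rw [← h]; exact String.ofList_toList.symm
    · intro h; subst h; simp
  by_cases hu : u = String.ofList pre
  · subst hu; rw [beq_self_eq_true]; exact hiff.mpr rfl
  · rw [beq_eq_false_iff_ne.mpr hu, Bool.eq_false_iff]
    intro hs; exact hu (hiff.mp hs)

-- the startswith condition for each cache key, as an equality test on sLower
lemma sw_Pt (u : String) : PySem.Str.startswith "pt(111)" (u ++ "(") = (u == "pt") := by
  have h := startswith_paren ['p','t'] ['1','1','1',')'] u (by decide) (by decide)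
  simpa [show String.ofList (['p','t'] ++ '(' :: ['1','1','1',')']) = "pt(111)" from by decide,
      show String.ofList ['p','t'] = "pt" from by decide] using h
lemma sw_Pd (u : String) : PySem.Str.startswith "pd(111)" (u ++ "(") = (u == "pd") := by
  have h := startswith_paren ['p','d'] ['1','1','1',')'] u (by decide) (by decide)
  simpa [show String.ofList (['p','d'] ++ '(' :: ['1','1','1',')']) = "pd(111)" from by decide,
      show String.ofList ['p','d'] = "pd" from by decide] using h
lemma sw_Ni (u : String) : PySem.Str.startswith "ni(111)" (u ++ "(") = (u == "ni") := by
  have h := startswith_paren ['n','i'] ['1','1','1',')'] u (by decide) (by decide)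
  simpa [show String.ofList (['n','i'] ++ '(' :: ['1','1','1',')']) = "ni(111)" from by decide,
      show String.ofList ['n','i'] = "ni" from by decide] using h
lemma sw_Cu (u : String) : PySem.Str.startswith "cu(111)" (u ++ "(") = (u == "cu") := by
  have h := startswith_paren ['c','u'] ['1','1','1',')'] u (by decide) (by decide)
  simpa [show String.ofList (['c','u'] ++ '(' :: ['1','1','1',')']) = "cu(111)" from by decide,
      show String.ofList ['c','u'] = "cu" from by decide] using h
lemma sw_Au (u : String) : PySem.Str.startswith "au(111)" (u ++ "(") = (u == "au") := by
  have h := startswith_paren ['a','u'] ['1','1','1',')'] u (by decide) (by decide)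
  simpa [show String.ofList (['a','u'] ++ '(' :: ['1','1','1',')']) = "au(111)" from by decide,
      show String.ofList ['a','u'] = "au" from by decide] using h
lemma sw_Ru (u : String) : PySem.Str.startswith "ru(0001)" (u ++ "(") = (u == "ru") := by
  have h := startswith_paren ['r','u'] ['0','0','0','1',')'] u (by decide) (by decide)
  simpa [show String.ofList (['r','u'] ++ '(' :: ['0','0','0','1',')']) = "ru(0001)" from by decide,
      show String.ofList ['r','u'] = "ru" from by decide] using h
lemma sw_Ir (u : String) : PySem.Str.startswith "ir(111)" (u ++ "(") = (u == "ir") := by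
  have h := startswith_paren ['i','r'] ['1','1','1',')'] u (by decide) (by decide)
  simpa [show String.ofList (['i','r'] ++ '(' :: ['1','1','1',')']) = "ir(111)" from by decide,
      show String.ofList ['i','r'] = "ir" from by decide] using h
lemma sw_Rh (u : String) : PySem.Str.startswith "rh(111)" (u ++ "(") = (u == "rh") := by
  have h := startswith_paren ['r','h'] ['1','1','1',')'] u (by decide) (by decide)
  simpa [show String.ofList (['r','h'] ++ '(' :: ['1','1','1',')']) = "rh(111)" from by decide,
      show String.ofList ['r','h'] = "rh" from by decide] using h

lemma tableB_eq : tableB = PySem.Dict.mk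
    [("pt(111)", "Pt(111)"), ("pd(111)", "Pd(111)"), ("ni(111)", "Ni(111)"), ("cu(111)", "Cu(111)"),
     ("au(111)", "Au(111)"), ("ru(0001)", "Ru(0001)"), ("ir(111)", "Ir(111)"), ("rh(111)", "Rh(111)"),
     ("pt", "Pt(111)"), ("pd", "Pd(111)"), ("ni", "Ni(111)"), ("cu", "Cu(111)"),
     ("au", "Au(111)"), ("ru", "Ru(0001)"), ("ir", "Ir(111)"), ("rh", "Rh(111)")] := by decide

-- the case-insensitive tail of A equals the table lookup
lemma loop_eq_table (u : String) :
    (match keyLoopA norskovKeysA u with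
     | some key => some key
     | none => aliasLoopA surfaceAliasesA.items u) = tableB.get? u := by
  rw [tableB_eq]
  by_cases h1 : u = "pt(111)"; · subst h1; decide
  by_cases h2 : u = "pd(111)"; · subst h2; decide
  by_cases h3 : u = "ni(111)"; · subst h3; decide
  by_cases h4 : u = "cu(111)"; · subst h4; decide
  by_cases h5 : u = "au(111)"; · subst h5; decide
  by_cases h6 : u = "ru(0001)"; · subst h6; decide
  by_cases h7 : u = "ir(111)"; · subst h7; decide
  by_cases h8 : u = "rh(111)"; · subst h8; decide
  by_cases h9 : u = "pt"; · subst h9; decide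
  by_cases h10 : u = "pd"; · subst h10; decide
  by_cases h11 : u = "ni"; · subst h11; decide
  by_cases h12 : u = "cu"; · subst h12; decide
  by_cases h13 : u = "au"; · subst h13; decide
  by_cases h14 : u = "ru"; · subst h14; decide
  by_cases h15 : u = "ir"; · subst h15; decide
  by_cases h16 : u = "rh"; · subst h16; decide
  have f1 : (u == "pt(111)") = false := beq_eq_false_iff_ne.mpr h1
  have g1 : ("pt(111)" == u) = false := beq_eq_false_iff_ne.mpr (Ne.symm h1)
  have f2 : (u == "pd(111)") = false := beq_eq_false_iff_ne.mpr h2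
  have g2 : ("pd(111)" == u) = false := beq_eq_false_iff_ne.mpr (Ne.symm h2)
  have f3 : (u == "ni(111)") = false := beq_eq_false_iff_ne.mpr h3
  have g3 : ("ni(111)" == u) = false := beq_eq_false_iff_ne.mpr (Ne.symm h3)
  have f4 : (u == "cu(111)") = false := beq_eq_false_iff_ne.mpr h4
  have g4 : ("cu(111)" == u) = false := beq_eq_false_iff_ne.mpr (Ne.symm h4)
  have f5 : (u == "au(111)") = false := beq_eq_false_iff_ne.mpr h5
  have g5 : ("au(111)" == u) = false := beq_eq_false_iff_ne.mpr (Ne.symm h5)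
  have f6 : (u == "ru(0001)") = false := beq_eq_false_iff_ne.mpr h6
  have g6 : ("ru(0001)" == u) = false := beq_eq_false_iff_ne.mpr (Ne.symm h6)
  have f7 : (u == "ir(111)") = false := beq_eq_false_iff_ne.mpr h7
  have g7 : ("ir(111)" == u) = false := beq_eq_false_iff_ne.mpr (Ne.symm h7)
  have f8 : (u == "rh(111)") = false := beq_eq_false_iff_ne.mpr h8
  have g8 : ("rh(111)" == u) = false := beq_eq_false_iff_ne.mpr (Ne.symm h8)
  have f9 : (u == "pt") = false := beq_eq_false_iff_ne.mpr h9
  have g9 : ("pt" == u) = false := beq_eq_false_iff_ne.mpr (Ne.symm h9)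
  have f10 : (u == "pd") = false := beq_eq_false_iff_ne.mpr h10
  have g10 : ("pd" == u) = false := beq_eq_false_iff_ne.mpr (Ne.symm h10)
  have f11 : (u == "ni") = false := beq_eq_false_iff_ne.mpr h11
  have g11 : ("ni" == u) = false := beq_eq_false_iff_ne.mpr (Ne.symm h11)
  have f12 : (u == "cu") = false := beq_eq_false_iff_ne.mpr h12
  have g12 : ("cu" == u) = false := beq_eq_false_iff_ne.mpr (Ne.symm h12)
  have f13 : (u == "au") = false := beq_eq_false_iff_ne.mpr h13
  have g13 : ("au" == u) = false := beq_eq_false_iff_ne.mpr (Ne.symm h13)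
  have f14 : (u == "ru") = false := beq_eq_false_iff_ne.mpr h14
  have g14 : ("ru" == u) = false := beq_eq_false_iff_ne.mpr (Ne.symm h14)
  have f15 : (u == "ir") = false := beq_eq_false_iff_ne.mpr h15
  have g15 : ("ir" == u) = false := beq_eq_false_iff_ne.mpr (Ne.symm h15)
  have f16 : (u == "rh") = false := beq_eq_false_iff_ne.mpr h16
  have g16 : ("rh" == u) = false := beq_eq_false_iff_ne.mpr (Ne.symm h16)
  simp only [norskovKeysA, surfaceAliasesA, keyLoopA, aliasLoopA, PySem.Dict.items,
    PySem.Dict.get?, List.find?,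
    show PySem.Str.lower "Pt(111)" = "pt(111)" from by decide,
    show PySem.Str.lower "Pd(111)" = "pd(111)" from by decide,
    show PySem.Str.lower "Ni(111)" = "ni(111)" from by decide,
    show PySem.Str.lower "Cu(111)" = "cu(111)" from by decide,
    show PySem.Str.lower "Au(111)" = "au(111)" from by decide,
    show PySem.Str.lower "Ru(0001)" = "ru(0001)" from by decide,
    show PySem.Str.lower "Ir(111)" = "ir(111)" from by decide,
    show PySem.Str.lower "Rh(111)" = "rh(111)" from by decide,
    show PySem.Str.lower "Pt" = "pt" from by decide,
    show PySem.Str.lower "Pd" = "pd" from by decide,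
    show PySem.Str.lower "Ni" = "ni" from by decide,
    show PySem.Str.lower "Cu" = "cu" from by decide,
    show PySem.Str.lower "Au" = "au" from by decide,
    show PySem.Str.lower "Ru" = "ru" from by decide,
    show PySem.Str.lower "Ir" = "ir" from by decide,
    show PySem.Str.lower "Rh" = "rh" from by decide,
    sw_Pt, sw_Pd, sw_Ni, sw_Cu, sw_Au, sw_Ru, sw_Ir, sw_Rh,
    f1, g1, f2, g2, f3, g3, f4, g4, f5, g5, f6, g6, f7, g7, f8, g8, f9, g9, f10, g10, f11, g11, f12, g12, f13, g13, f14, g14, f15, g15, f16, g16]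
  simp

lemma body_eq (t : String) :
    (if norskovKeysA.contains t then some t
     else if surfaceAliasesA.contains t then surfaceAliasesA.get? t
     else
       match keyLoopA norskovKeysA (PySem.Str.lower t) with
       | some key => some key
       | none => aliasLoopA surfaceAliasesA.items (PySem.Str.lower t)) = tableB.get? (PySem.Str.lower t) := by
  by_cases e1 : t = "Pt(111)"; · subst e1; decide
  by_cases e2 : t = "Pd(111)"; · subst e2; decide
  by_cases e3 : t = "Ni(111)"; · subst e3; decide
  by_cases e4 : t = "Cu(111)"; · subst e4; decide
  by_cases e5 : t = "Au(111)"; · subst e5; decide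
  by_cases e6 : t = "Ru(0001)"; · subst e6; decide
  by_cases e7 : t = "Ir(111)"; · subst e7; decide
  by_cases e8 : t = "Rh(111)"; · subst e8; decide
  by_cases e9 : t = "Pt"; · subst e9; decide
  by_cases e10 : t = "Pd"; · subst e10; decide
  by_cases e11 : t = "Ni"; · subst e11; decide
  by_cases e12 : t = "Cu"; · subst e12; decide
  by_cases e13 : t = "Au"; · subst e13; decide
  by_cases e14 : t = "Ru"; · subst e14; decide
  by_cases e15 : t = "Ir"; · subst e15; decide
  by_cases e16 : t = "Rh"; · subst e16; decide
  have hc1 : norskovKeysA.contains t = false := by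
    simp [norskovKeysA, List.contains_eq_mem, e1, e2, e3, e4, e5, e6, e7, e8]
  have hc2 : surfaceAliasesA.contains t = false := by
    simp only [surfaceAliasesA, PySem.Dict.contains, PySem.Dict.keys, List.contains_eq_mem]
    simp [e9, e10, e11, e12, e13, e14, e15, e16,
      Ne.symm e9, Ne.symm e10, Ne.symm e11, Ne.symm e12, Ne.symm e13, Ne.symm e14,
      Ne.symm e15, Ne.symm e16]
  rw [hc1, if_neg (by simp), hc2, if_neg (by simp)]
  exact loop_eq_table (PySem.Str.lower t)

-- ===== VERDICT (by name: the statement is the Claim_ definition above) =====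
theorem resolve_cache_key_py_spec : Claim_equal_resolve_cache_key_py := by
  intro surface _
  unfold Spec_resolve_cache_key_py resolve_cache_key_py resolve_cache_key_py_alt
  exact body_eq (PySem.Str.strip surface)
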